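-- pv_equiv track=rewrite | github.com/ChavezAILabs/CAIL-rh-investigation | scripts/rh_phase18b_prep.py | ngap_stat
-- ===== SOURCE A (Python) =====
-- def ngap_stat(gap_seq, k):
--     """k-gap statistic: central gap times sum of surrounding gaps in k-window."""
--     if k == 1:
--         return list(gap_seq)
--     mid = k // 2
--     result = []
--     for i in range(len(gap_seq) - k + 1):
--         window = gap_seq[i:i+k]
--         central = window[mid]
--         surrounding = sum(window[:mid]) + sum(window[mid+1:])
--         result.append(central * surrounding)
--     return result
-- ===== SOURCE B (Python) =====
-- def ngap_stat(gap_seq, k):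
--     """k-gap statistic via prefix sums: window sum in O(1), surrounding = window sum - central."""
--     if k == 1:
--         return list(gap_seq)
--     mid = k // 2
--     prefix = [0]
--     for g in gap_seq:
--         prefix.append(prefix[-1] + g)
--     return [gap_seq[i + mid] * (prefix[i + k] - prefix[i] - gap_seq[i + mid])
--             for i in range(len(gap_seq) - k + 1)]
-- ===== Notes on version B (the rewrite author's own statement) =====
-- stated objective: faster
-- what changed: Replaces per-window slicing and two slice sums (O(n*k)) with a single prefix-sum array, computing each window sum in O(1) as prefix[i+k]-prefix[i] and surrounding as window sum minus the central gap.
import Mathlib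
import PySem

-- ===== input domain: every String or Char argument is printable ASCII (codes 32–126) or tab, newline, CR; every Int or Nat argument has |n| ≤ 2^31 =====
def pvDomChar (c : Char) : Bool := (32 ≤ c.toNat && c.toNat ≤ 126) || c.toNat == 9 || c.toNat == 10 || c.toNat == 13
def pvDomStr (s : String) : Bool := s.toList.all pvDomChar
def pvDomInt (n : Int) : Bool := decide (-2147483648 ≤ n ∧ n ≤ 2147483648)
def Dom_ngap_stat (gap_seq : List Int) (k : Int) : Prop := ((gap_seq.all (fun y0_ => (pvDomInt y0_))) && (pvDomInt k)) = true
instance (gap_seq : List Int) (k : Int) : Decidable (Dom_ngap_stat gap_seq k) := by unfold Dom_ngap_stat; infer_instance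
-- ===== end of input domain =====

-- B replaces A's per-window slicing and slice sums with a single prefix-sum array (asymptotically faster).


-- ===== PORT A =====
def ngap_stat (gap_seq : List Int) (k : Int) : List Int :=
  if k = 1 then gap_seq
  else
    let mid := PySem.Int.floordiv k 2
    (PySem.List.pyRange 0 ((gap_seq.length : Int) - k + 1) 1).foldl
      (fun result i =>
        let window := PySem.List.slice gap_seq (some i) (some (i + k))
        let central := PySem.List.pyGetD window mid 0
        let surrounding := (PySem.List.slice window none (some mid)).sum
                         + (PySem.List.slice window (some (mid + 1)) none).sum
        result ++ [central * surrounding]) []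

-- ===== PORT B =====
def ngap_stat_alt (gap_seq : List Int) (k : Int) : List Int :=
  if k = 1 then gap_seq
  else
    let mid := PySem.Int.floordiv k 2
    let pfx := gap_seq.foldl (fun p g => p ++ [PySem.List.pyGetD p (-1) 0 + g]) [0]
    (PySem.List.pyRange 0 ((gap_seq.length : Int) - k + 1) 1).map
      (fun i =>
        let c := PySem.List.pyGetD gap_seq (i + mid) 0
        c * (PySem.List.pyGetD pfx (i + k) 0 - PySem.List.pyGetD pfx i 0 - c))

-- ===== PRECONDITION & SPEC =====
-- Pre_ excludes exactly k ≤ 0, where the Python A raises IndexError (every window slice is empty there).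
def Pre_ngap_stat (gap_seq : List Int) (k : Int) : Prop := 1 ≤ k
instance (gap_seq : List Int) (k : Int) : Decidable (Pre_ngap_stat gap_seq k) := by unfold Pre_ngap_stat; infer_instance
def pvWitness_ngap_stat : List Int × Int := ([3, 5, 7, 9, 11], 3)

def Spec_ngap_stat (gap_seq : List Int) (k : Int) (out : List Int) : Prop := out = ngap_stat_alt gap_seq k
instance (gap_seq : List Int) (k : Int) (out : List Int) : Decidable (Spec_ngap_stat gap_seq k out) := by unfold Spec_ngap_stat; infer_instance

-- ===== CLAIM (what is proved, stated in full; the proofs are below) =====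
def Claim_equal_ngap_stat : Prop := ∀ (gap_seq : List Int) (k : Int), Dom_ngap_stat gap_seq k → Pre_ngap_stat gap_seq k → Spec_ngap_stat gap_seq k (ngap_stat gap_seq k)

-- ===== LEMMAS AND PROOFS =====

/-- Running partial sums starting from accumulator value `s`. -/
def partialSums (s : Int) : List Int → List Int
  | [] => []
  | g :: gs => (s + g) :: partialSums (s + g) gs

lemma prefix_go (ys : List Int) (acc : List Int) (s : Int)
    (hlast : PySem.List.pyGetD acc (-1) 0 = s) :
    ys.foldl (fun p g => p ++ [PySem.List.pyGetD p (-1) 0 + g]) acc = acc ++ partialSums s ys := by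
  induction ys generalizing acc s with
  | nil => simp [partialSums]
  | cons g gs ih =>
    simp only [List.foldl_cons, hlast, partialSums]
    rw [ih (acc ++ [s + g]) (s + g) (PySem.List.pyGetD_neg_one_append_singleton acc (s + g) 0)]
    simp

lemma partialSums_length (xs : List Int) (s : Int) :
    (partialSums s xs).length = xs.length := by
  induction xs generalizing s with
  | nil => rfl
  | cons g gs ih => simp [partialSums, ih]

lemma partialSums_get (xs : List Int) (s : Int) (j : Nat) (hj : j < xs.length) :
    (partialSums s xs)[j]'(by rw [partialSums_length]; exact hj) = s + (xs.take (j + 1)).sum := by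
  induction xs generalizing s j with
  | nil => simp at hj
  | cons g gs ih =>
    cases j with
    | zero => simp [partialSums]
    | succ j =>
      simp only [partialSums, List.getElem_cons_succ, List.take_succ_cons, List.sum_cons]
      rw [ih (s + g) j (by simpa using hj)]
      ring

lemma prefix_get (xs : List Int) (j : Nat) (hj : j ≤ xs.length) :
    PySem.List.pyGetD (0 :: partialSums 0 xs) (j : Int) 0 = (xs.take j).sum := by
  rw [PySem.List.pyGetD_natCast]
  cases j with
  | zero => simp
  | succ j =>
    rw [List.getD_eq_getElem _ _ (by simp [partialSums_length]; omega)]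
    simpa using partialSums_get xs 0 j (by omega)

lemma sum_split (w : List Int) (m : Nat) (hm : m < w.length) :
    (w.take m).sum + (w.drop (m + 1)).sum = w.sum - w.getD m 0 := by
  have h1 : w.sum = (w.take m).sum + (w.drop m).sum := by
    rw [← List.sum_append, List.take_append_drop]
  have h2 : w.drop m = w[m] :: w.drop (m + 1) := List.drop_eq_getElem_cons hm
  have h3 : w.getD m 0 = w[m] := List.getD_eq_getElem w 0 hm
  rw [h3, h1, h2, List.sum_cons]; ring

theorem ngap_stat_spec : Claim_equal_ngap_stat := by
  intro gap_seq k _ hk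
  unfold Spec_ngap_stat ngap_stat ngap_stat_alt
  by_cases h1 : k = 1
  · simp [h1]
  · have hk2 : 2 ≤ k := by
      have : (1 : Int) ≤ k := hk
      omega
    simp only [if_neg h1]
    rw [PySem.List.foldl_append_singleton_eq_map, prefix_go gap_seq [0] 0 (by decide)]
    simp only [List.nil_append, List.cons_append, List.nil_append]
    refine List.map_congr_left ?_
    intro i hi
    obtain ⟨hi0, hiub⟩ := PySem.List.mem_pyRange_one.mp hi
    simp only [PySem.Int.floordiv_eq_ediv_of_pos (by norm_num : (0:Int) < 2)]
    have hmid1 : 1 ≤ k / 2 := by omega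
    have hmidk : k / 2 < k := by omega
    have hikn : i + k ≤ (gap_seq.length : Int) := by omega
    -- window as drop/take
    have hkt : (i + k).toNat - i.toNat = k.toNat := by omega
    have hwin : PySem.List.slice gap_seq (some i) (some (i + k)) =
        (gap_seq.drop i.toNat).take k.toNat := by
      rw [PySem.List.slice_toNat gap_seq hi0 (by omega), hkt]
    have hwlen : ((gap_seq.drop i.toNat).take k.toNat).length = k.toNat := by
      rw [List.length_take, List.length_drop]; omega
    -- central element, both sides
    have hc1 : PySem.List.pyGetD ((gap_seq.drop i.toNat).take k.toNat) (k / 2) 0 =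
        gap_seq.getD (i.toNat + (k / 2).toNat) 0 := by
      rw [PySem.List.pyGetD_eq_getElem _ 0 (by omega) (by rw [hwlen]; omega)]
      rw [List.getElem_take, List.getElem_drop]
      rw [List.getD_eq_getElem gap_seq 0 (by
        have := List.length_drop (l := gap_seq) (i := i.toNat)
        omega)]
    have hc2 : PySem.List.pyGetD gap_seq (i + k / 2) 0 =
        gap_seq.getD (i.toNat + (k / 2).toNat) 0 := by
      rw [PySem.List.pyGetD_eq_getElem _ 0 (by omega) (by omega)]
      rw [List.getD_eq_getElem gap_seq 0 (by omega)]
      congr 1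
      omega
    -- the two slice sums
    have hs1 : PySem.List.slice ((gap_seq.drop i.toNat).take k.toNat) none (some (k / 2)) =
        ((gap_seq.drop i.toNat).take k.toNat).take (k / 2).toNat :=
      PySem.List.slice_to _ (by omega)
    have hs2 : PySem.List.slice ((gap_seq.drop i.toNat).take k.toNat) (some (k / 2 + 1)) none =
        ((gap_seq.drop i.toNat).take k.toNat).drop ((k / 2).toNat + 1) := by
      rw [PySem.List.slice_from _ (by omega)]
      congr 1
      omega
    have hsplit := sum_split ((gap_seq.drop i.toNat).take k.toNat) (k / 2).toNat (by rw [hwlen]; omega)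
    have hcw : ((gap_seq.drop i.toNat).take k.toNat).getD (k / 2).toNat 0 =
        gap_seq.getD (i.toNat + (k / 2).toNat) 0 := by
      rw [List.getD_eq_getElem _ 0 (by rw [hwlen]; omega), List.getElem_take, List.getElem_drop]
      rw [List.getD_eq_getElem gap_seq 0 (by omega)]
    -- prefix sums give the window sum
    have hpi : PySem.List.pyGetD (0 :: partialSums 0 gap_seq) i 0 = (gap_seq.take i.toNat).sum := by
      have := prefix_get gap_seq i.toNat (by omega)
      rwa [Int.toNat_of_nonneg hi0] at this
    have hpik : PySem.List.pyGetD (0 :: partialSums 0 gap_seq) (i + k) 0 =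
        (gap_seq.take (i + k).toNat).sum := by
      have := prefix_get gap_seq (i + k).toNat (by omega)
      rwa [Int.toNat_of_nonneg (by omega)] at this
    have hwsum : (gap_seq.take (i + k).toNat).sum =
        (gap_seq.take i.toNat).sum + ((gap_seq.drop i.toNat).take k.toNat).sum := by
      have : (i + k).toNat = i.toNat + k.toNat := by omega
      rw [this, List.take_add, List.sum_append]
    simp only [hwin, hc1, hc2, hs1, hs2, hpi, hpik, hwsum]
    rw [hcw] at hsplit
    rw [hsplit]
    ring
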